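-- pv_equiv track=rewrite | github.com/tinangel/ShaderToolsNG | libs/keys.py | RampsKeys
-- ===== SOURCE A (Python) =====
-- def RampsKeys(type_ramp):
--     ramps  = \
--     ["#1#_ramp.elements.position", "#1#_ramp.elements.color", "#1#_ramp.blend",
--      "#1#_ramp.input", "#1#_ramp.factor", "#1#_ramp.interpolation",]
--     count = 0
--     for v in ramps:
--         ramps[count] = v.replace("#1#", type_ramp)
--         count = count + 1
--     if type_ramp == 'color' or type_ramp == 'point_density_color':
--         exceptions = ("%s_ramp.input"%type_ramp, "%s_ramp.factor"%type_ramp, "%s_ramp.blend"%type_ramp,)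
--         for e in exceptions:
--             ramps.remove(e)
--     return ramps
-- ===== SOURCE B (Python) =====
-- def RampsKeys(type_ramp):
--     if type_ramp == 'color' or type_ramp == 'point_density_color':
--         suffixes = ['elements.position', 'elements.color', 'interpolation']
--     else:
--         suffixes = ['elements.position', 'elements.color', 'blend',
--                     'input', 'factor', 'interpolation']
--     return ['%s_ramp.%s' % (type_ramp, s) for s in suffixes]
-- ===== Notes on version B (the rewrite author's own statement) =====
-- stated objective: simpler
-- what changed: B selects the right suffix list up front (reduced list for 'color'/'point_density_color') and builds the keys in one comprehension, instead of A's build-all-via-in-place-replace loop followed by a second remove-by-value pass.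
import Mathlib
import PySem

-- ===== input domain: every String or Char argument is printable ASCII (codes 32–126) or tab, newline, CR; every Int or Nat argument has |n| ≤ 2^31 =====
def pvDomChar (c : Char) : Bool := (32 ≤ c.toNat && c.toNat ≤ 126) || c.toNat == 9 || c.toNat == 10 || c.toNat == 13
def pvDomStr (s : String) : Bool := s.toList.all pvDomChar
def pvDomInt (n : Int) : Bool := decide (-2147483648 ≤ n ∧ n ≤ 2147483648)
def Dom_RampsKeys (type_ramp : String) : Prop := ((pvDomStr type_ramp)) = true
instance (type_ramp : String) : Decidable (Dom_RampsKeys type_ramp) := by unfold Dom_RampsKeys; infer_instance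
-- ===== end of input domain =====

-- B picks the correct suffix list up front and maps the prefix over it, replacing
-- A's build-all-via-replace loop plus a second remove-by-value pass (objective: simpler).


-- ===== PORT A =====
def RampsKeys (type_ramp : String) : List String :=
  let ramps0 : List String :=
    ["#1#_ramp.elements.position", "#1#_ramp.elements.color", "#1#_ramp.blend",
     "#1#_ramp.input", "#1#_ramp.factor", "#1#_ramp.interpolation"]
  -- for v in ramps: ramps[count] = v.replace("#1#", type_ramp); count += 1
  -- (Python overwrites ramps[count] only after reading v = ramps[count], so the loop
  --  sees each original element exactly once; the fold carries the (list, count) state)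
  let ramps :=
    (ramps0.foldl (fun (st : List String × Nat) v =>
      (st.1.set st.2 (PySem.Str.replace v "#1#" type_ramp), st.2 + 1)) (ramps0, 0)).1
  if type_ramp = "color" ∨ type_ramp = "point_density_color" then
    let exceptions : List String :=
      [type_ramp ++ "_ramp.input", type_ramp ++ "_ramp.factor", type_ramp ++ "_ramp.blend"]
    -- for e in exceptions: ramps.remove(e) — remove? is none on ValueError, which cannot
    -- occur here (the three keys are always present in ramps); .getD keeps the port total
    (exceptions.foldl (fun acc e => acc.bind (fun l => PySem.List.remove? l e))
      (some ramps)).getD ramps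
  else
    ramps

-- ===== PORT B =====
def RampsKeys_alt (type_ramp : String) : List String :=
  let suffixes : List String :=
    if type_ramp = "color" ∨ type_ramp = "point_density_color" then
      ["elements.position", "elements.color", "interpolation"]
    else
      ["elements.position", "elements.color", "blend", "input", "factor", "interpolation"]
  suffixes.map (fun s => type_ramp ++ "_ramp." ++ s)

-- ===== PRECONDITION & SPEC =====
def Spec_RampsKeys (type_ramp : String) (out : List String) : Prop := out = RampsKeys_alt type_ramp
instance (type_ramp : String) (out : List String) : Decidable (Spec_RampsKeys type_ramp out) := by unfold Spec_RampsKeys; infer_instance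

-- ===== CLAIM (what is proved, stated in full; the proofs are below) =====
def Claim_equal_RampsKeys : Prop := ∀ (type_ramp : String), Dom_RampsKeys type_ramp → Spec_RampsKeys type_ramp (RampsKeys type_ramp)

-- ===== LEMMAS AND PROOFS =====

theorem RampsKeys_eq_alt (type_ramp : String) :
    RampsKeys type_ramp = RampsKeys_alt type_ramp := by
  by_cases h : type_ramp = "color" ∨ type_ramp = "point_density_color"
  · rcases h with h | h <;> subst h <;> decide
  · simp [RampsKeys, RampsKeys_alt, h, PySem.Str.replace, PySem.Chars.replace,
      PySem.Chars.replace.go, List.foldl, List.set, String.append_assoc]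

-- ===== VERDICT (by name: the statement is the Claim_ definition above) =====
theorem RampsKeys_spec : Claim_equal_RampsKeys := by
  intro t _
  exact RampsKeys_eq_alt t
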